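-- pv_equiv track=rewrite | github.com/deltaori0/Python-Algorithm | programmers/124 나라의 숫자.py | solution
-- ===== SOURCE A (Python) =====
-- from itertools import product
--
-- def solution(n):
--     answer = ''
--
--     nums = [1, 2, 4]
--     lst = []
--     for x in range(1, n+1):
--         if len(lst) >= n:
--             break
--         lst += list(product(nums, repeat=x))
--     answer = lst[n-1]
--
--     answer = ''.join(map(str, answer))
--
--     return answer
-- ===== SOURCE B (Python) =====
-- def solution(n):
--     answer = ''
--     while n > 0:
--         n -= 1
--         answer = "124"[n % 3] + answer
--         n //= 3
--     return answer
-- ===== Notes on version B (the rewrite author's own statement) =====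
-- stated objective: faster
-- what changed: B replaces A's breadth-first enumeration of all 124-tuples up to index n with a direct bijective base-3 digit conversion (n-1 mod 3 picks the digit, n //= 3 descends).
import Mathlib
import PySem

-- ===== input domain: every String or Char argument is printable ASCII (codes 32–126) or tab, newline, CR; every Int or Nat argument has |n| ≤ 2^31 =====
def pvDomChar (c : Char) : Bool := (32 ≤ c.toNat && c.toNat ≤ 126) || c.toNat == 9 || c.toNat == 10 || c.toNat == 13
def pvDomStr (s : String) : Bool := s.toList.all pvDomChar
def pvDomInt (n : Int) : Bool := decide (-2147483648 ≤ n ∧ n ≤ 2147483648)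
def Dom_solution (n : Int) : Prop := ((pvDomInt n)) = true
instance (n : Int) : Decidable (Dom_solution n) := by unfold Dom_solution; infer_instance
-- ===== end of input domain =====

-- B replaces A's breadth-first enumeration of 124-tuples by bijective base-3 digit conversion.

-- ===== PORT A =====
-- itertools.product([1,2,4], repeat=k), in itertools order (rightmost coordinate varies fastest):
-- exact right-recursive form  product(repeat=k+1) = [t+(a,) for t in product(repeat=k) for a in [1,2,4]]
def prodA : Nat → List (List Int)
  | 0 => [[]]
  | k + 1 => (prodA k).flatMap (fun t => [(1 : Int), 2, 4].map (fun a => t ++ [a]))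

-- the 'for x in range(1, n+1): if len(lst) >= n: break; lst += list(product(...))' loop
def aLoop : List Int → Int → List (List Int) → List (List Int)
  | [], _, lst => lst
  | x :: xs, n, lst =>
      if n ≤ (lst.length : Int) then lst
      else aLoop xs n (lst ++ prodA x.toNat)

def solution (n : Int) : String :=
  match PySem.List.pyGet? (aLoop (PySem.List.pyRange 1 (n + 1) 1) n []) (n - 1) with
  | some answer => PySem.Str.join "" (answer.map PySem.Int.toStr)
  | none => ""   -- Python raises IndexError here (n ≤ 0, outside Pre_solution)

-- ===== PORT B =====
-- "124"[r] for r = (n-1) % 3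
def digitB (r : Nat) : Char := if r = 0 then '1' else if r = 1 then '2' else '4'

-- the while loop: n -= 1; answer = "124"[n % 3] + answer; n //= 3
def bGo : Nat → List Char → List Char
  | 0, s => s
  | m + 1, s => bGo (m / 3) (digitB (m % 3) :: s)
decreasing_by exact Nat.lt_succ_of_le (Nat.div_le_self m 3)

def solution_alt (n : Int) : String := String.ofList (bGo n.toNat [])

-- ===== PRECONDITION & SPEC =====
-- Pre_ excludes exactly n ≤ 0, on which A raises IndexError (lst[n-1] on an empty list).
def Pre_solution (n : Int) : Prop := 1 ≤ n
instance (n : Int) : Decidable (Pre_solution n) := by unfold Pre_solution; infer_instance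
def pvWitness_solution : Int := (5)

def Spec_solution (n : Int) (out : String) : Prop := out = solution_alt n
instance (n : Int) (out : String) : Decidable (Spec_solution n out) := by unfold Spec_solution; infer_instance

-- ===== CLAIM (what is proved, stated in full; the proofs are below) =====
def Claim_equal_solution : Prop := ∀ (n : Int), Dom_solution n → Pre_solution n → Spec_solution n (solution n)

-- ===== LEMMAS AND PROOFS =====

-- digit value of a 124-tuple entry
def digitI (r : Nat) : Int := if r = 0 then 1 else if r = 1 then 2 else 4

-- bijective base-3 tuple of n (the intended value of lst[n-1])
def fI : Nat → List Int
  | 0 => []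
  | m + 1 => fI (m / 3) ++ [digitI (m % 3)]
decreasing_by exact Nat.lt_succ_of_le (Nat.div_le_self m 3)

-- its character form
def F : Nat → List Char
  | 0 => []
  | m + 1 => F (m / 3) ++ [digitB (m % 3)]
decreasing_by exact Nat.lt_succ_of_le (Nat.div_le_self m 3)

-- k ordinary base-3 digits of i, mapped through 1/2/4
def tup : Nat → Nat → List Int
  | 0, _ => []
  | k + 1, i => tup k (i / 3) ++ [digitI (i % 3)]

-- lst after x = 1, …, k of A's loop
def Lk : Nat → List (List Int)
  | 0 => []
  | k + 1 => Lk k ++ prodA (k + 1)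

lemma length_prodA (k : Nat) : (prodA k).length = 3 ^ k := by
  induction k with
  | zero => rfl
  | succ k ih => simp [prodA, List.length_flatMap, ih, pow_succ]

lemma flatMap3_getElem? (ys : List (List Int)) (i : Nat) :
    (ys.flatMap (fun t => [t ++ [(1 : Int)], t ++ [2], t ++ [4]]))[i]? =
      ys[i / 3]?.map (fun t => t ++ [digitI (i % 3)]) := by
  induction ys generalizing i with
  | nil => simp
  | cons t ys ih =>
    by_cases h : i < 3
    · interval_cases i <;> simp [digitI]
    · have h3 : 3 ≤ i := by omega
      have hsplit : (t :: ys).flatMap (fun t => [t ++ [(1 : Int)], t ++ [2], t ++ [4]]) =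
          [t ++ [(1 : Int)], t ++ [2], t ++ [4]] ++
            ys.flatMap (fun t => [t ++ [(1 : Int)], t ++ [2], t ++ [4]]) := by simp
      rw [hsplit, List.getElem?_append_right (by simp; omega)]
      simp only [List.length_cons, List.length_nil]
      rw [ih (i - 3)]
      have h1 : (i - 3) / 3 = i / 3 - 1 := by omega
      have h2 : (i - 3) % 3 = i % 3 := by omega
      have h4 : 1 ≤ i / 3 := by omega
      rw [h1, h2]
      congr 1
      cases hq : i / 3 with
      | zero => omega
      | succ q => simp

lemma prodA_getElem? (k i : Nat) (hi : i < 3 ^ k) :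
    (prodA k)[i]? = some (tup k i) := by
  induction k generalizing i with
  | zero =>
    have : i = 0 := by simpa using hi
    subst this; rfl
  | succ k ih =>
    have hstep : prodA (k + 1) =
        (prodA k).flatMap (fun t => [t ++ [(1 : Int)], t ++ [2], t ++ [4]]) := by
      simp [prodA]
    have hdiv : i / 3 < 3 ^ k := by
      rw [Nat.div_lt_iff_lt_mul (by norm_num)]
      calc i < 3 ^ (k + 1) := hi
        _ = 3 ^ k * 3 := by rw [pow_succ]
    rw [hstep, flatMap3_getElem? (prodA k) i, ih _ hdiv]
    rfl

lemma length_Lk_ge (k : Nat) : k ≤ (Lk k).length := by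
  induction k with
  | zero => simp [Lk]
  | succ k ih =>
    have : 1 ≤ 3 ^ (k + 1) := Nat.one_le_pow _ _ (by norm_num)
    simp only [Lk, List.length_append, length_prodA]
    omega

lemma two_len_Lk (k : Nat) : 2 * (Lk k).length + 3 = 3 ^ (k + 1) := by
  induction k with
  | zero => simp [Lk]
  | succ k ih =>
    have h2 : (Lk (k + 1)).length = (Lk k).length + 3 ^ (k + 1) := by
      rw [show Lk (k + 1) = Lk k ++ prodA (k + 1) from rfl]
      simp [length_prodA]
    rw [h2, show (3 : ℕ) ^ (k + 1 + 1) = 3 ^ (k + 1) * 3 from pow_succ 3 (k + 1)]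
    generalize (3 : ℕ) ^ (k + 1) = a at ih ⊢
    omega

lemma length_Lk_succ (k : Nat) : (Lk (k + 1)).length = 3 * (Lk k).length + 3 := by
  have ha := two_len_Lk k
  have hb := two_len_Lk (k + 1)
  rw [show (3 : ℕ) ^ (k + 1 + 1) = 3 ^ (k + 1) * 3 from pow_succ 3 (k + 1), ← ha] at hb
  omega

lemma tup_fI (k : Nat) : ∀ i, i < 3 ^ (k + 1) → fI ((Lk k).length + 1 + i) = tup (k + 1) i := by
  induction k with
  | zero =>
    intro i hi
    have : i < 3 := by simpa using hi
    interval_cases i <;> simp [Lk, fI, tup, digitI]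
  | succ k ih =>
    intro i hi
    have harg : (Lk (k + 1)).length + 1 + i = (3 * (Lk k).length + 3 + i) + 1 := by
      rw [length_Lk_succ]; omega
    rw [harg]
    show fI ((3 * (Lk k).length + 3 + i) + 1) = tup (k + 2) i
    rw [fI]
    have hm : (3 * (Lk k).length + 3 + i) % 3 = i % 3 := by omega
    have hd : (3 * (Lk k).length + 3 + i) / 3 = (Lk k).length + 1 + i / 3 := by omega
    have hdiv : i / 3 < 3 ^ (k + 1) := by
      rw [Nat.div_lt_iff_lt_mul (by norm_num)]
      calc i < 3 ^ (k + 2) := hi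
        _ = 3 ^ (k + 1) * 3 := by rw [pow_succ]
    rw [hm, hd, ih _ hdiv]
    rfl

lemma Lk_getElem? (k : Nat) : ∀ n : Nat, 1 ≤ n → n ≤ (Lk k).length →
    (Lk k)[n - 1]? = some (fI n) := by
  induction k with
  | zero => intro n h1 h2; simp [Lk] at h2; omega
  | succ k ih =>
    intro n h1 h2
    show (Lk k ++ prodA (k + 1))[n - 1]? = some (fI n)
    by_cases hle : n ≤ (Lk k).length
    · rw [List.getElem?_append_left (by omega)]
      exact ih n h1 hle
    · have hlen : (Lk (k + 1)).length = (Lk k).length + 3 ^ (k + 1) := by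
        rw [show Lk (k + 1) = Lk k ++ prodA (k + 1) from rfl]
        simp [length_prodA]
      set i := n - 1 - (Lk k).length with hi
      have hn : n = (Lk k).length + 1 + i := by omega
      have hib : i < 3 ^ (k + 1) := by
        have := h2; rw [hlen] at this; omega
      rw [List.getElem?_append_right (by omega)]
      have heq : n - 1 - (Lk k).length = i := by omega
      rw [heq, prodA_getElem? _ _ hib, hn, tup_fI k i hib]

lemma aLoop_spec : ∀ (c j : Nat) (n : Int), (n - j).toNat = c →
    ∃ k, aLoop (PySem.List.pyRange ((j : Int) + 1) (n + 1) 1) n (Lk j) = Lk k ∧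
      n ≤ ((Lk k).length : Int) := by
  intro c
  induction c with
  | zero =>
    intro j n hc
    rw [PySem.List.pyRange_one_eq_nil (by omega)]
    refine ⟨j, rfl, ?_⟩
    have := length_Lk_ge j
    omega
  | succ c ih =>
    intro j n hc
    rw [PySem.List.pyRange_one_cons (by omega)]
    rw [aLoop]
    by_cases h : n ≤ ((Lk j).length : Int)
    · rw [if_pos h]; exact ⟨j, rfl, h⟩
    · rw [if_neg h]
      have hL : Lk j ++ prodA (((j : Int) + 1).toNat) = Lk (j + 1) := by
        rw [show ((j : Int) + 1).toNat = j + 1 by omega]; rfl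
      rw [hL]
      have hcast : (j : Int) + 1 + 1 = ((j + 1 : Nat) : Int) + 1 := by push_cast; ring
      rw [hcast]
      exact ih (j + 1) n (by push_cast; omega)

lemma bGo_eq (m : Nat) : ∀ s, bGo m s = F m ++ s := by
  induction m using Nat.strong_induction_on with
  | _ m ih =>
    match m with
    | 0 => intro s; simp [bGo, F]
    | m + 1 =>
      intro s
      rw [bGo, F, ih (m / 3) (Nat.lt_succ_of_le (Nat.div_le_self m 3))]
      simp

lemma fI_chars (m : Nat) : ((fI m).map PySem.Int.toStr).map String.toList =
    (F m).map (fun c => [c]) := by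
  induction m using Nat.strong_induction_on with
  | _ m ih =>
    match m with
    | 0 => simp [fI, F]
    | m + 1 =>
      rw [fI, F]
      simp only [List.map_append, List.map_cons, List.map_nil,
        ih (m / 3) (Nat.lt_succ_of_le (Nat.div_le_self m 3))]
      congr 1
      have : m % 3 = 0 ∨ m % 3 = 1 ∨ m % 3 = 2 := by omega
      rcases this with h | h | h <;> rw [h] <;> rfl

-- ===== VERDICT (by name: the statement is the Claim_ definition above) =====
theorem solution_spec : Claim_equal_solution := by
  intro n _ hpre
  unfold Spec_solution
  have hn1 : (1 : Int) ≤ n := hpre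
  obtain ⟨k, hrun, hlen⟩ := aLoop_spec (n - (0 : Nat)).toNat 0 n rfl
  have hrun' : aLoop (PySem.List.pyRange 1 (n + 1) 1) n [] = Lk k := by
    rw [show ((0 : Nat) : Int) + 1 = (1 : Int) by norm_num, show Lk 0 = ([] : List (List Int)) from rfl] at hrun
    exact hrun
  unfold solution
  rw [hrun']
  set m := n.toNat with hm
  have hidx : n - 1 = ((m - 1 : Nat) : Int) := by omega
  rw [hidx, PySem.List.pyGet?_natCast, Lk_getElem? k m (by omega) (by omega)]
  show PySem.Str.join "" ((fI m).map PySem.Int.toStr) = solution_alt n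
  unfold solution_alt
  apply String.toList_inj.mp
  rw [← hm, bGo_eq m []]
  simp only [PySem.Str.toList_join, String.toList_ofList, List.append_nil]
  rw [show ("" : String).toList = ([] : List Char) from rfl, fI_chars m]
  exact PySem.Chars.join_nil_singletons (F m)
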